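-- pv_equiv track=rewrite | github.com/rajirajeshwari/DS300123 | DSA-ASS-2.7.py | move_negative
-- ===== SOURCE A (Python) =====
-- def move_negative(arr):
--     neg_arr = []
--     pos_arr = []
--     for i in arr:
--         if i < 0:
--             neg_arr.append(i)
--         else:
--             pos_arr.append(i)
--     return neg_arr + pos_arr
-- ===== SOURCE B (Python) =====
-- def move_negative(arr):
--     return sorted(arr, key=lambda x: 0 if x < 0 else 1)
-- ===== Notes on version B (the rewrite author's own statement) =====
-- stated objective: idiomatic
-- what changed: Replaces the two-accumulator partition loop with a single stable sort keyed on sign (0 for negatives, 1 otherwise); stability preserves intra-group order, reproducing A exactly.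
import Mathlib
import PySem

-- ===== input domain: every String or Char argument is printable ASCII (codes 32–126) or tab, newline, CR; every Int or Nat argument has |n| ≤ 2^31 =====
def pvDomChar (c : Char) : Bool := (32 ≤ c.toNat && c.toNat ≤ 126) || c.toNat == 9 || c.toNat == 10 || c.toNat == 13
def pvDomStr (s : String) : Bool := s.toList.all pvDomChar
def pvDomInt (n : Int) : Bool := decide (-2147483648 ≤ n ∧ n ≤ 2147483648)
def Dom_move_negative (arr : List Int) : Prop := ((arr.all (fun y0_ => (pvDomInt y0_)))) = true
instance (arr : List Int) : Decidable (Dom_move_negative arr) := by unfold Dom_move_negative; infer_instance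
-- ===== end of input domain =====

-- B replaces A's two-accumulator partition loop with a single stable sort keyed on sign (idiomatic, same result).

-- ===== PORT A =====
-- A: one pass appending each element to neg_arr or pos_arr, then neg_arr + pos_arr.
def move_negative (arr : List Int) : List Int :=
  let st := arr.foldl
    (fun (st : List Int × List Int) i =>
      if i < 0 then (st.1 ++ [i], st.2) else (st.1, st.2 ++ [i]))
    ([], [])
  st.1 ++ st.2

-- ===== PORT B =====
-- B: sorted(arr, key=lambda x: 0 if x < 0 else 1)  (stable sort on the sign key)
def move_negative_alt (arr : List Int) : List Int :=
  PySem.List.sorted arr (fun x => if x < 0 then (0 : Int) else 1)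

-- ===== PRECONDITION & SPEC =====
def Spec_move_negative (arr : List Int) (out : List Int) : Prop := out = move_negative_alt arr
instance (arr : List Int) (out : List Int) : Decidable (Spec_move_negative arr out) := by unfold Spec_move_negative; infer_instance

-- ===== CLAIM (what is proved, stated in full; the proofs are below) =====
def Claim_equal_move_negative : Prop := ∀ (arr : List Int), Dom_move_negative arr → Spec_move_negative arr (move_negative arr)

-- ===== LEMMAS AND PROOFS =====

-- Inserting a negative element into a partitioned list places it after the negatives, before the non-negatives (stability).
lemma insertBy_neg (negs poss : List Int) (x : Int) (hx : x < 0)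
    (hn : ∀ y ∈ negs, y < 0) (hp : ∀ y ∈ poss, ¬ y < 0) :
    PySem.List.insertBy
      (fun a b => decide ((if a < 0 then (0 : Int) else 1) < (if b < 0 then (0 : Int) else 1)))
      x (negs ++ poss) = negs ++ x :: poss := by
  induction negs with
  | nil =>
    cases poss with
    | nil => simp [PySem.List.insertBy]
    | cons y ys =>
      have hy : ¬ y < 0 := hp y (by simp)
      simp [PySem.List.insertBy, hx, hy]
  | cons n ns ih =>
    have hn0 : n < 0 := hn n (by simp)
    simp only [List.cons_append]
    rw [show PySem.List.insertBy
      (fun a b => decide ((if a < 0 then (0 : Int) else 1) < (if b < 0 then (0 : Int) else 1)))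
      x (n :: (ns ++ poss)) = n :: PySem.List.insertBy
      (fun a b => decide ((if a < 0 then (0 : Int) else 1) < (if b < 0 then (0 : Int) else 1)))
      x (ns ++ poss) from by simp [PySem.List.insertBy, hx, hn0]]
    rw [ih (fun y hy => hn y (by simp [hy]))]

-- Inserting a non-negative element appends it at the end (its key 1 is never below any key).
lemma insertBy_nonneg (ys : List Int) (x : Int) (hx : ¬ x < 0) :
    PySem.List.insertBy
      (fun a b => decide ((if a < 0 then (0 : Int) else 1) < (if b < 0 then (0 : Int) else 1)))
      x ys = ys ++ [x] := by
  apply PySem.List.insertBy_of_forall_not_before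
  intro y _
  simp only [hx, if_false, decide_eq_false_iff_not, not_lt]
  split <;> omega

-- Loop correspondence: insertion sort's accumulator stays the concatenation of A's two accumulators.
lemma loop_eq (xs : List Int) : ∀ (negs poss : List Int),
    (∀ y ∈ negs, y < 0) → (∀ y ∈ poss, ¬ y < 0) →
    xs.foldl
      (fun acc x => PySem.List.insertBy
        (fun a b => decide ((if a < 0 then (0 : Int) else 1) < (if b < 0 then (0 : Int) else 1)))
        x acc) (negs ++ poss)
    = (xs.foldl
        (fun (st : List Int × List Int) i =>
          if i < 0 then (st.1 ++ [i], st.2) else (st.1, st.2 ++ [i]))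
        (negs, poss)).1
      ++ (xs.foldl
        (fun (st : List Int × List Int) i =>
          if i < 0 then (st.1 ++ [i], st.2) else (st.1, st.2 ++ [i]))
        (negs, poss)).2 := by
  induction xs with
  | nil => intro negs poss _ _; simp
  | cons x xs ih =>
    intro negs poss hn hp
    by_cases hx : x < 0
    · simp only [List.foldl_cons, if_pos hx]
      rw [insertBy_neg negs poss x hx hn hp]
      have : negs ++ x :: poss = (negs ++ [x]) ++ poss := by simp
      rw [this]
      exact ih (negs ++ [x]) poss
        (fun y hy => by rcases List.mem_append.1 hy with h | h
                        · exact hn y h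
                        · simp at h; omega) hp
    · simp only [List.foldl_cons, if_neg hx]
      rw [insertBy_nonneg (negs ++ poss) x hx, List.append_assoc]
      exact ih negs (poss ++ [x]) hn
        (fun y hy => by rcases List.mem_append.1 hy with h | h
                        · exact hp y h
                        · simp at h; omega)

-- ===== VERDICT (by name: the statement is the Claim_ definition above) =====
theorem move_negative_spec : Claim_equal_move_negative := by
  intro arr _
  show move_negative arr = move_negative_alt arr
  rw [move_negative_alt, PySem.List.sorted_eq_foldl_insertBy]
  have h := loop_eq arr [] [] (by simp) (by simp)
  simp only [List.nil_append] at h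
  rw [h]
  rfl
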